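-- pv_equiv track=rewrite | github.com/ritika121219/wipro_talentnext | files/mini_project4.py | calculate_happiness
-- ===== SOURCE A (Python) =====
-- def calculate_happiness(like_str, dislike_str, given_str):
--     like_set = set(like_str.split('-'))
--     dislike_set = set(dislike_str.split('-'))
--     given_list = given_str.split('-')
--
--     happiness = 0
--     for num in given_list:
--         if num in like_set:
--             happiness += 1
--         elif num in dislike_set:
--             happiness -= 1
--     return happiness
-- ===== SOURCE B (Python) =====
-- def calculate_happiness(like_str, dislike_str, given_str):
--     cnt = {}
--     for w in given_str.split('-'):
--         cnt[w] = cnt.get(w, 0) + 1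
--     like_set = set(like_str.split('-'))
--     dislike_set = set(dislike_str.split('-'))
--     pos = sum(cnt.get(w, 0) for w in like_set)
--     neg = sum(cnt.get(w, 0) for w in dislike_set - like_set)
--     return pos - neg
-- ===== Notes on version B (the rewrite author's own statement) =====
-- stated objective: alternative
-- what changed: B builds a frequency table of the given words once and sums counts over the like vocabulary minus counts over the dislike-minus-like vocabulary, instead of A's single pass over the given list with per-word membership tests.
import Mathlib
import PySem

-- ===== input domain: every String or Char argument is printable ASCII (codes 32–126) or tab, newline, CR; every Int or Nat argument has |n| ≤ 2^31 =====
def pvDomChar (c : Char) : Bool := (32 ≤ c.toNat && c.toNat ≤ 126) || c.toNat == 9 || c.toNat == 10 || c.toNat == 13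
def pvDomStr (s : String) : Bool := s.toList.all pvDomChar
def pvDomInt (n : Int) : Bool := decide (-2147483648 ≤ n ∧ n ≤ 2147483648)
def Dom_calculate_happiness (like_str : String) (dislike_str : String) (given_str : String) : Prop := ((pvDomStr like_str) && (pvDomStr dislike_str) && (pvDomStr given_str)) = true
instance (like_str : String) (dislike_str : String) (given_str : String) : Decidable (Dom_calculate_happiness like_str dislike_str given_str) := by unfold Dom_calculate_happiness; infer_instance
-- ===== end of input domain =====

-- B replaces A's single membership-tested pass over the given list by a frequency table of the
-- given words summed over the like / dislike-minus-like vocabularies (objective: alternative).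

-- s.split('-') — the separator is the nonempty literal "-", so split? is always `some`; getD [] is never taken.
def pvSplitDash (s : String) : List String := (PySem.Str.split? s "-").getD []

-- ===== PORT A =====
def calculate_happiness (like_str : String) (dislike_str : String) (given_str : String) : Int :=
  let likeSet := PySem.Set.ofList (pvSplitDash like_str)
  let dislikeSet := PySem.Set.ofList (pvSplitDash dislike_str)
  let givenList := pvSplitDash given_str
  givenList.foldl (fun happiness num =>
    if likeSet.contains num then happiness + 1
    else if dislikeSet.contains num then happiness - 1
    else happiness) 0

-- ===== PORT B =====
def calculate_happiness_alt (like_str : String) (dislike_str : String) (given_str : String) : Int :=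
  let cnt := (pvSplitDash given_str).foldl
    (fun d w => d.insert w (d.getD w 0 + 1)) PySem.Dict.empty
  let likeSet := PySem.Set.ofList (pvSplitDash like_str)
  let dislikeSet := PySem.Set.ofList (pvSplitDash dislike_str)
  let pos := (likeSet.map (fun w => cnt.getD w 0)).sum
  let neg := ((PySem.Set.diff dislikeSet likeSet).map (fun w => cnt.getD w 0)).sum
  pos - neg

-- ===== PRECONDITION & SPEC =====
def Spec_calculate_happiness (like_str : String) (dislike_str : String) (given_str : String) (out : Int) : Prop := out = calculate_happiness_alt like_str dislike_str given_str
instance (like_str : String) (dislike_str : String) (given_str : String) (out : Int) : Decidable (Spec_calculate_happiness like_str dislike_str given_str out) := by unfold Spec_calculate_happiness; infer_instance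

-- ===== CLAIM (what is proved, stated in full; the proofs are below) =====
def Claim_equal_calculate_happiness : Prop := ∀ (like_str : String) (dislike_str : String) (given_str : String), Dom_calculate_happiness like_str dislike_str given_str → Spec_calculate_happiness like_str dislike_str given_str (calculate_happiness like_str dislike_str given_str)

-- ===== LEMMAS AND PROOFS =====

-- counting the members of a nodup vocabulary, head peeled off
theorem pv_countP_contains_cons (gs : List String) (x : String) (S : List String) (hx : x ∉ S) :
    gs.countP (fun g => (x :: S).contains g) = gs.count x + gs.countP (fun g => S.contains g) := by
  induction gs with
  | nil => simp
  | cons g gs ih =>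
      simp only [List.countP_cons, List.count_cons, ih]
      by_cases h : g = x
      · subst h
        simp [hx]
        omega
      · simp [h]
        omega

-- the sum of per-word counts over a nodup vocabulary is the countP of membership
theorem pv_sum_count_eq_countP (gs : List String) (S : List String) (h : S.Nodup) :
    (S.map (fun w => (gs.count w : Int))).sum = (gs.countP (fun g => S.contains g) : Int) := by
  induction S with
  | nil => simp
  | cons x S ih =>
      have hx : x ∉ S := (List.nodup_cons.mp h).1
      have hS : S.Nodup := (List.nodup_cons.mp h).2
      rw [List.map_cons, List.sum_cons, ih hS, pv_countP_contains_cons gs x S hx]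
      push_cast
      ring

-- A's loop as two countP's
theorem pv_foldA (L D gs : List String) (h0 : Int) :
    gs.foldl (fun h num => if L.contains num then h + 1 else if D.contains num then h - 1 else h) h0
      = h0 + (gs.countP (fun g => L.contains g) : Int)
          - (gs.countP (fun g => !L.contains g && D.contains g) : Int) := by
  induction gs generalizing h0 with
  | nil => simp
  | cons g gs ih =>
      simp only [List.foldl_cons, List.countP_cons, ih]
      by_cases hL : g ∈ L
      · simp [hL]
        ring
      · by_cases hD : g ∈ D
        · simp [hL, hD]
          ring
        · simp [hL, hD]

-- the whole equivalence at the list level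
theorem pv_main (L D : PySem.Set String) (hLnd : L.Nodup) (hDnd : D.Nodup) (g : List String) :
    g.foldl (fun happiness num =>
        if L.contains num then happiness + 1
        else if D.contains num then happiness - 1
        else happiness) 0
      = (L.map (fun w => (g.count w : Int))).sum
          - ((PySem.Set.diff D L).map (fun w => (g.count w : Int))).sum := by
  refine (pv_foldA L D g 0).trans ?_
  rw [pv_sum_count_eq_countP g L hLnd,
      pv_sum_count_eq_countP g (PySem.Set.diff D L) (PySem.Set.nodup_diff D L hDnd)]
  have hcong : g.countP (fun w => List.contains (PySem.Set.diff D L) w)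
      = g.countP (fun w => !List.contains L w && List.contains D w) := by
    apply List.countP_congr
    intro w _
    by_cases hD : w ∈ D <;> by_cases hL : w ∈ L <;>
      simp [PySem.Set.mem_diff, hD, hL]
  rw [hcong]
  ring

-- ===== VERDICT (by name: the statement is the Claim_ definition above) =====
theorem calculate_happiness_spec : Claim_equal_calculate_happiness := by
  intro ls ds gs _
  unfold Spec_calculate_happiness calculate_happiness calculate_happiness_alt
  simp only
  have hcnt : ∀ v : String,
      ((pvSplitDash gs).foldl (fun d w => d.insert w (d.getD w 0 + 1)) PySem.Dict.empty).getD v 0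
        = ((pvSplitDash gs).count v : Int) := by
    intro v
    rw [PySem.Dict.getD_foldl_insert_add_one]
    simp [PySem.Dict.empty, PySem.Dict.getD, PySem.Dict.get?]
  simp only [hcnt]
  exact pv_main _ _ (PySem.Set.nodup_ofList _) (PySem.Set.nodup_ofList _) (pvSplitDash gs)
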